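-- pv_equiv track=rewrite | github.com/olegkizyma006-lgtm/atlastrinity | src/brain/mcp_registry.py | get_servers_for_task
-- ===== SOURCE A (Python) =====
-- from typing import Any, Dict, List, Optional
--
-- def get_servers_for_task(task_type: str) -> List[str]:
--     """
--     Suggest servers based on task type.
--     Used for intelligent lazy initialization.
--     """
--     task_lower = task_type.lower()
--
--     # Direct mappings
--     if any(x in task_lower for x in ["gui", "click", "type", "window", "app", "screen"]):
--         return ["macos-use"]
--     if any(x in task_lower for x in ["terminal", "command", "shell", "bash"]):
--         return ["macos-use"]
--     if any(x in task_lower for x in ["file", "read", "write", "directory"]):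
--         return ["filesystem", "macos-use"]
--     if any(x in task_lower for x in ["search", "web", "internet", "google", "find", "browser", "navigate", "automation", "scrape"]):
--         return ["puppeteer", "macos-use"]
--     if any(x in task_lower for x in ["calendar", "event", "meeting"]):
--         return ["macos-use"]
--     if any(x in task_lower for x in ["reminder", "todo", "task"]):
--         return ["macos-use"]
--     if any(x in task_lower for x in ["note", "notes"]):
--         return ["macos-use"]  # Use Apple Notes via macos-use
--     if any(x in task_lower for x in ["mail", "email"]):
--         return ["macos-use"]
--     if any(x in task_lower for x in ["git", "commit", "push", "pull", "branch"]):
--         return ["macos-use"]  # Route git to macos-use (legacy override)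
--     if any(x in task_lower for x in ["github", "repository", "issue", "pr"]):
--         return ["macos-use"]  # Route github to macos-use (browser/cli)
--     if any(x in task_lower for x in ["debug", "error", "fix", "analyze"]):
--         return ["vibe", "sequential-thinking"]
--     if any(x in task_lower for x in ["code", "review", "refactor"]):
--         return ["vibe"]
--     if any(x in task_lower for x in ["think", "reason", "complex", "decision"]):
--         return ["sequential-thinking"]
--     if any(x in task_lower for x in ["time", "clock", "date"]):
--         return ["macos-use"]
--     if any(x in task_lower for x in ["fetch", "url", "http", "download"]):
--         return ["macos-use"]
--     if any(x in task_lower for x in ["memory", "recall", "remember", "fact", "knowledge", "observation"]):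
--         return ["memory"]
--     if any(x in task_lower for x in ["graph", "visualize", "diagram", "mermaid", "map", "relationship"]):
--         return ["graph", "memory"]
--
--     # Default: return core servers
--     return ["macos-use", "filesystem"]
-- ===== SOURCE B (Python) =====
-- from typing import List
--
-- # Flat keyword -> rule-priority map (priority = position of the rule in the spec).
-- _KEYWORD_RULE = (
--     ("gui", 0), ("click", 0), ("type", 0), ("window", 0), ("app", 0), ("screen", 0),
--     ("terminal", 1), ("command", 1), ("shell", 1), ("bash", 1),
--     ("file", 2), ("read", 2), ("write", 2), ("directory", 2),
--     ("search", 3), ("web", 3), ("internet", 3), ("google", 3), ("find", 3),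
--     ("browser", 3), ("navigate", 3), ("automation", 3), ("scrape", 3),
--     ("calendar", 4), ("event", 4), ("meeting", 4),
--     ("reminder", 5), ("todo", 5), ("task", 5),
--     ("note", 6), ("notes", 6),
--     ("mail", 7), ("email", 7),
--     ("git", 8), ("commit", 8), ("push", 8), ("pull", 8), ("branch", 8),
--     ("github", 9), ("repository", 9), ("issue", 9), ("pr", 9),
--     ("debug", 10), ("error", 10), ("fix", 10), ("analyze", 10),
--     ("code", 11), ("review", 11), ("refactor", 11),
--     ("think", 12), ("reason", 12), ("complex", 12), ("decision", 12),
--     ("time", 13), ("clock", 13), ("date", 13),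
--     ("fetch", 14), ("url", 14), ("http", 14), ("download", 14),
--     ("memory", 15), ("recall", 15), ("remember", 15), ("fact", 15),
--     ("knowledge", 15), ("observation", 15),
--     ("graph", 16), ("visualize", 16), ("diagram", 16), ("mermaid", 16),
--     ("map", 16), ("relationship", 16),
-- )
--
-- _RESULTS = (
--     ["macos-use"], ["macos-use"], ["filesystem", "macos-use"],
--     ["puppeteer", "macos-use"], ["macos-use"], ["macos-use"], ["macos-use"],
--     ["macos-use"], ["macos-use"], ["macos-use"], ["vibe", "sequential-thinking"],
--     ["vibe"], ["sequential-thinking"], ["macos-use"], ["macos-use"],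
--     ["memory"], ["graph", "memory"],
-- )
--
-- def get_servers_for_task(task_type: str) -> List[str]:
--     tl = task_type.lower()
--     best = None
--     for kw, rule in _KEYWORD_RULE:
--         if kw in tl:
--             best = rule if best is None else min(best, rule)
--     if best is None:
--         return ["macos-use", "filesystem"]
--     return list(_RESULTS[best])
-- ===== Notes on version B (the rewrite author's own statement) =====
-- stated objective: alternative
-- what changed: Replaced the ordered first-match if/return cascade with a flat keyword->rule-priority map scanned exhaustively, returning the results-table entry of the minimum matching priority (argmin) instead of short-circuiting at the first matching branch.
import Mathlib
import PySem

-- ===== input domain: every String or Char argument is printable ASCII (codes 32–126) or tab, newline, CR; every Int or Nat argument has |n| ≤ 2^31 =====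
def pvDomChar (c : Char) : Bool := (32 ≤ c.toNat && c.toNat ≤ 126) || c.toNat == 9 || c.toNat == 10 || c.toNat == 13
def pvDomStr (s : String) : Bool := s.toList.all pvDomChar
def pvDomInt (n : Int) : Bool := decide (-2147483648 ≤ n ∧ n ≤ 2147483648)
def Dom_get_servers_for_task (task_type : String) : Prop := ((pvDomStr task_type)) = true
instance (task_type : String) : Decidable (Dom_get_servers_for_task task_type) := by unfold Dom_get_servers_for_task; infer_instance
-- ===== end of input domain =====

-- B replaces A's ordered first-match cascade by an exhaustive argmin scan over a flat
-- keyword -> rule-priority map, then indexes a results table (objective: alternative).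

-- ===== PORT A =====
def get_servers_for_task (task_type : String) : List String :=
  let task_lower := PySem.Str.lower task_type
  if ["gui", "click", "type", "window", "app", "screen"].any (fun x => PySem.Str.isIn x task_lower) then ["macos-use"]
  else if ["terminal", "command", "shell", "bash"].any (fun x => PySem.Str.isIn x task_lower) then ["macos-use"]
  else if ["file", "read", "write", "directory"].any (fun x => PySem.Str.isIn x task_lower) then ["filesystem", "macos-use"]
  else if ["search", "web", "internet", "google", "find", "browser", "navigate", "automation", "scrape"].any (fun x => PySem.Str.isIn x task_lower) then ["puppeteer", "macos-use"]
  else if ["calendar", "event", "meeting"].any (fun x => PySem.Str.isIn x task_lower) then ["macos-use"]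
  else if ["reminder", "todo", "task"].any (fun x => PySem.Str.isIn x task_lower) then ["macos-use"]
  else if ["note", "notes"].any (fun x => PySem.Str.isIn x task_lower) then ["macos-use"]
  else if ["mail", "email"].any (fun x => PySem.Str.isIn x task_lower) then ["macos-use"]
  else if ["git", "commit", "push", "pull", "branch"].any (fun x => PySem.Str.isIn x task_lower) then ["macos-use"]
  else if ["github", "repository", "issue", "pr"].any (fun x => PySem.Str.isIn x task_lower) then ["macos-use"]
  else if ["debug", "error", "fix", "analyze"].any (fun x => PySem.Str.isIn x task_lower) then ["vibe", "sequential-thinking"]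
  else if ["code", "review", "refactor"].any (fun x => PySem.Str.isIn x task_lower) then ["vibe"]
  else if ["think", "reason", "complex", "decision"].any (fun x => PySem.Str.isIn x task_lower) then ["sequential-thinking"]
  else if ["time", "clock", "date"].any (fun x => PySem.Str.isIn x task_lower) then ["macos-use"]
  else if ["fetch", "url", "http", "download"].any (fun x => PySem.Str.isIn x task_lower) then ["macos-use"]
  else if ["memory", "recall", "remember", "fact", "knowledge", "observation"].any (fun x => PySem.Str.isIn x task_lower) then ["memory"]
  else if ["graph", "visualize", "diagram", "mermaid", "map", "relationship"].any (fun x => PySem.Str.isIn x task_lower) then ["graph", "memory"]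
  else ["macos-use", "filesystem"]

-- ===== PORT B =====
-- Source B's flat keyword -> rule-priority map (_KEYWORD_RULE)
def pvKeywordRule : List (String × Nat) :=
  [ ("gui", 0), ("click", 0), ("type", 0), ("window", 0), ("app", 0), ("screen", 0),
    ("terminal", 1), ("command", 1), ("shell", 1), ("bash", 1),
    ("file", 2), ("read", 2), ("write", 2), ("directory", 2),
    ("search", 3), ("web", 3), ("internet", 3), ("google", 3), ("find", 3),
    ("browser", 3), ("navigate", 3), ("automation", 3), ("scrape", 3),
    ("calendar", 4), ("event", 4), ("meeting", 4),
    ("reminder", 5), ("todo", 5), ("task", 5),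
    ("note", 6), ("notes", 6),
    ("mail", 7), ("email", 7),
    ("git", 8), ("commit", 8), ("push", 8), ("pull", 8), ("branch", 8),
    ("github", 9), ("repository", 9), ("issue", 9), ("pr", 9),
    ("debug", 10), ("error", 10), ("fix", 10), ("analyze", 10),
    ("code", 11), ("review", 11), ("refactor", 11),
    ("think", 12), ("reason", 12), ("complex", 12), ("decision", 12),
    ("time", 13), ("clock", 13), ("date", 13),
    ("fetch", 14), ("url", 14), ("http", 14), ("download", 14),
    ("memory", 15), ("recall", 15), ("remember", 15), ("fact", 15),
    ("knowledge", 15), ("observation", 15),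
    ("graph", 16), ("visualize", 16), ("diagram", 16), ("mermaid", 16),
    ("map", 16), ("relationship", 16) ]

-- Source B's results table (_RESULTS)
def pvResults : List (List String) :=
  [ ["macos-use"], ["macos-use"], ["filesystem", "macos-use"],
    ["puppeteer", "macos-use"], ["macos-use"], ["macos-use"], ["macos-use"],
    ["macos-use"], ["macos-use"], ["macos-use"], ["vibe", "sequential-thinking"],
    ["vibe"], ["sequential-thinking"], ["macos-use"], ["macos-use"],
    ["memory"], ["graph", "memory"] ]

-- loop body: best = rule if best is None else min(best, rule)
def pvStep (tl : String) (best : Option Nat) (p : String × Nat) : Option Nat :=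
  if PySem.Str.isIn p.1 tl then
    some (match best with | none => p.2 | some b => min b p.2)
  else best

def get_servers_for_task_alt (task_type : String) : List String :=
  let tl := PySem.Str.lower task_type
  match pvKeywordRule.foldl (pvStep tl) none with
  | none => ["macos-use", "filesystem"]
  | some best => pvResults.getD best ["macos-use", "filesystem"]

-- ===== PRECONDITION & SPEC =====
def Spec_get_servers_for_task (task_type : String) (out : List String) : Prop := out = get_servers_for_task_alt task_type
instance (task_type : String) (out : List String) : Decidable (Spec_get_servers_for_task task_type out) := by unfold Spec_get_servers_for_task; infer_instance

-- ===== CLAIM (what is proved, stated in full; the proofs are below) =====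
def Claim_equal_get_servers_for_task : Prop := ∀ (task_type : String), Dom_get_servers_for_task task_type → Spec_get_servers_for_task task_type (get_servers_for_task task_type)

-- ===== LEMMAS AND PROOFS =====

-- proof-only view of the rule table as ordered (keywords, servers) groups
def pvGroups : List (List String × List String) :=
  [ (["gui", "click", "type", "window", "app", "screen"], ["macos-use"]),
    (["terminal", "command", "shell", "bash"], ["macos-use"]),
    (["file", "read", "write", "directory"], ["filesystem", "macos-use"]),
    (["search", "web", "internet", "google", "find", "browser", "navigate", "automation", "scrape"], ["puppeteer", "macos-use"]),
    (["calendar", "event", "meeting"], ["macos-use"]),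
    (["reminder", "todo", "task"], ["macos-use"]),
    (["note", "notes"], ["macos-use"]),
    (["mail", "email"], ["macos-use"]),
    (["git", "commit", "push", "pull", "branch"], ["macos-use"]),
    (["github", "repository", "issue", "pr"], ["macos-use"]),
    (["debug", "error", "fix", "analyze"], ["vibe", "sequential-thinking"]),
    (["code", "review", "refactor"], ["vibe"]),
    (["think", "reason", "complex", "decision"], ["sequential-thinking"]),
    (["time", "clock", "date"], ["macos-use"]),
    (["fetch", "url", "http", "download"], ["macos-use"]),
    (["memory", "recall", "remember", "fact", "knowledge", "observation"], ["memory"]),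
    (["graph", "visualize", "diagram", "mermaid", "map", "relationship"], ["graph", "memory"]) ]

def pvFlatFrom (i : Nat) (gs : List (List String × List String)) : List (String × Nat) :=
  match gs with
  | [] => []
  | (g, _) :: rest => g.map (fun k => (k, i)) ++ pvFlatFrom (i + 1) rest

def pvFirstIdx (gs : List (List String × List String)) (tl : String) : Option Nat :=
  match gs with
  | [] => none
  | (g, _) :: rest =>
      if g.any (fun k => PySem.Str.isIn k tl) then some 0
      else (pvFirstIdx rest tl).map (· + 1)

def pvCascade (gs : List (List String × List String)) (tl : String) : List String :=
  match gs with
  | [] => ["macos-use", "filesystem"]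
  | (g, s) :: rest =>
      if g.any (fun k => PySem.Str.isIn k tl) then s else pvCascade rest tl

theorem pvFlatFrom_ge (gs : List (List String × List String)) (i : Nat) :
    ∀ p ∈ pvFlatFrom i gs, i ≤ p.2 := by
  induction gs generalizing i with
  | nil => intro p hp; simp [pvFlatFrom] at hp
  | cons hd rest ih =>
      intro p hp
      rcases hd with ⟨g, s⟩
      simp only [pvFlatFrom, List.mem_append, List.mem_map] at hp
      rcases hp with ⟨k, _, rfl⟩ | hp
      · exact le_refl i
      · exact Nat.le_of_succ_le (ih (i + 1) p hp)

theorem pvFoldl_from_some (tl : String) (pairs : List (String × Nat)) (i : Nat)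
    (h : ∀ p ∈ pairs, i ≤ p.2) :
    pairs.foldl (pvStep tl) (some i) = some i := by
  induction pairs with
  | nil => rfl
  | cons p rest ih =>
      have hi : i ≤ p.2 := h p (by simp)
      have hrest : ∀ q ∈ rest, i ≤ q.2 := fun q hq => h q (by simp [hq])
      simp only [List.foldl_cons, pvStep]
      by_cases hk : PySem.Str.isIn p.1 tl
      · simp only [hk, if_true]
        have : min i p.2 = i := Nat.min_eq_left hi
        rw [this]; exact ih hrest
      · simp only [hk, if_neg]; exact ih hrest

theorem pvGroup_fold (tl : String) (g : List String) (i : Nat) :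
    (g.map (fun k => (k, i))).foldl (pvStep tl) none
      = if g.any (fun k => PySem.Str.isIn k tl) then some i else none := by
  induction g with
  | nil => rfl
  | cons k g' ih =>
      simp only [List.map_cons, List.foldl_cons, List.any_cons, pvStep]
      by_cases hk : PySem.Str.isIn k tl
      · simp only [hk, if_true, Bool.true_or]
        exact pvFoldl_from_some tl _ i (by
          intro p hp
          simp only [List.mem_map] at hp
          obtain ⟨k, _, rfl⟩ := hp
          exact le_refl i)
      · simp only [hk, Bool.false_or, if_neg]
        exact ih

theorem pvBest_flatFrom (gs : List (List String × List String)) (i : Nat) (tl : String) :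
    (pvFlatFrom i gs).foldl (pvStep tl) none = (pvFirstIdx gs tl).map (i + ·) := by
  induction gs generalizing i with
  | nil => rfl
  | cons hd rest ih =>
      rcases hd with ⟨g, s⟩
      simp only [pvFlatFrom, pvFirstIdx, List.foldl_append]
      by_cases hg : g.any (fun k => PySem.Str.isIn k tl)
      · simp only [hg, if_true]
        rw [pvGroup_fold tl g i, if_pos hg]
        rw [pvFoldl_from_some tl _ i (by
          intro p hp
          exact Nat.le_of_succ_le (pvFlatFrom_ge rest (i + 1) p hp))]
        simp
      · simp only [hg, if_neg]
        rw [pvGroup_fold tl g i, if_neg hg, ih (i + 1)]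
        cases pvFirstIdx rest tl with
        | none => simp
        | some j => simp [Option.map_some]; omega

theorem pvCascade_eq (gs : List (List String × List String)) (tl : String) :
    (match pvFirstIdx gs tl with
     | none => ["macos-use", "filesystem"]
     | some j => (gs.map Prod.snd).getD j ["macos-use", "filesystem"])
      = pvCascade gs tl := by
  induction gs with
  | nil => rfl
  | cons hd rest ih =>
      rcases hd with ⟨g, s⟩
      simp only [pvFirstIdx, pvCascade]
      by_cases hg : g.any (fun k => PySem.Str.isIn k tl)
      · rw [if_pos hg, if_pos hg]
        rfl
      · rw [if_neg hg, if_neg hg, ← ih]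
        cases pvFirstIdx rest tl with
        | none => simp
        | some j => simp [List.getD]

theorem pvFlat_eq : pvKeywordRule = pvFlatFrom 0 pvGroups := by decide

theorem pvResults_eq : pvResults = pvGroups.map Prod.snd := by decide

-- ===== VERDICT (by name: the statement is the Claim_ definition above) =====
theorem get_servers_for_task_spec : Claim_equal_get_servers_for_task := by
  intro t _
  unfold Spec_get_servers_for_task
  show get_servers_for_task t =
    (match pvKeywordRule.foldl (pvStep (PySem.Str.lower t)) none with
     | none => ["macos-use", "filesystem"]
     | some best => pvResults.getD best ["macos-use", "filesystem"])
  rw [pvFlat_eq, pvResults_eq, pvBest_flatFrom pvGroups 0 (PySem.Str.lower t)]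
  have h := pvCascade_eq pvGroups (PySem.Str.lower t)
  simp only [Nat.zero_add, Option.map_id'] at h ⊢
  rw [h]
  rfl
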